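-- pv_equiv track=rewrite | github.com/therealkraus/learning | python/labs109.py | collapse_intervals
-- ===== SOURCE A (Python) =====
-- def collapse_intervals(items):
--     if len(items) == 0:
--         return ""
--
--     if len(items) == 1:
--         return str(items[0])
--
--     intervals = ""
--     min_num = items[0]
--     max_num = -1
--
--     for i in range(0, len(items) - 1):
--         if items[i] + 1 != items[i + 1]:
--             max_num = items[i]
--             if min_num != max_num:
--                 interval = "-".join([str(min_num), str(max_num)])
--             else:
--                 interval = str(min_num)
--             min_num = items[i + 1]
--             intervals = ",".join([intervals, interval])
--         else:
--             max_num = items[i]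
--
--     max_num = items[-1]
--     if min_num != max_num:
--         interval = "-".join([str(min_num), str(max_num)])
--     else:
--         interval = str(min_num)
--     intervals = ",".join([intervals, interval])
--
--     return intervals[1:]
-- ===== SOURCE B (Python) =====
-- def collapse_intervals(items):
--     if not items:
--         return ""
--     # mark each position: marks[i] is True iff items[i] starts a new run
--     marks = [True] + [a + 1 != b for a, b in zip(items, items[1:])]
--     starts = [x for x, m in zip(items, marks) if m]
--     ends = [x for x, m in zip(items, marks[1:] + [True]) if m]
--     return ",".join(str(s) if s == e else f"{s}-{e}" for s, e in zip(starts, ends))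
-- ===== Notes on version B (the rewrite author's own statement) =====
-- stated objective: faster
-- what changed: A is a single stateful loop that interleaves run detection with rendering and rebuilds the whole accumulator string via ','.join at every run break, stripping a sentinel leading comma at the end; B has no accumulator loop at all: it marks run boundaries by zipping the list with its own tail, extracts the run-start and run-end values with two filtering comprehensions, zips them and joins the rendered pairs once.
import Mathlib
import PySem

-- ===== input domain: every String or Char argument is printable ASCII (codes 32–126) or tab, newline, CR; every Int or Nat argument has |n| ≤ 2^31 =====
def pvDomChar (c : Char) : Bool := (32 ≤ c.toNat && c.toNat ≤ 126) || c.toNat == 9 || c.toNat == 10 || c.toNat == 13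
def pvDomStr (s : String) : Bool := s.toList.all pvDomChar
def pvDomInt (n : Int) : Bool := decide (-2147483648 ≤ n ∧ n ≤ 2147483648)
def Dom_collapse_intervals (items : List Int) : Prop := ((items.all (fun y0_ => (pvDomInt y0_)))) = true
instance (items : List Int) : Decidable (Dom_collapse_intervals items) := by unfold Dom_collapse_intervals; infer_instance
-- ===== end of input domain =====

-- B replaces A's stateful accumulator loop (which re-joins the whole accumulator string at every run
-- break and strips a sentinel leading comma) by a loop-free staged formulation: mark run starts by
-- zipping the list with its own tail, filter out the run-start and run-end values, zip and render.

-- ===== PORT A =====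
-- A's loop over i in range(0, len-1): state (intervals, min_num, max_num); current element and the
-- remaining elements play the role of items[i] and items[i+1:]; the post-loop code (max_num = items[-1];
-- render; append) is the recursion base (rest = []), where cur = items[-1].
def pvALoop (cur : Int) (rest : List Int) (minN maxN : Int) (acc : List Char) : List Char :=
  match rest with
  | [] =>
      let maxN' := cur
      let interval := if minN ≠ maxN' then PySem.Chars.join ['-'] [PySem.Int.toChars minN, PySem.Int.toChars maxN'] else PySem.Int.toChars minN
      PySem.Chars.join [','] [acc, interval]
  | next :: rest' =>
      if cur + 1 ≠ next then
        let maxN' := cur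
        let interval := if minN ≠ maxN' then PySem.Chars.join ['-'] [PySem.Int.toChars minN, PySem.Int.toChars maxN'] else PySem.Int.toChars minN
        pvALoop next rest' next maxN' (PySem.Chars.join [','] [acc, interval])
      else
        pvALoop next rest' minN cur acc

def collapse_intervals (items : List Int) : String :=
  match items with
  | [] => ""
  | [x] => String.ofList (PySem.Int.toChars x)
  | x :: rest => String.ofList (PySem.List.slice (pvALoop x rest x (-1) []) (some 1) none)

-- ===== PORT B =====
-- Source B: marks = [True] + [a+1 != b for a,b in zip(items, items[1:])]; starts / ends by filtering
-- items against marks resp. marks[1:]+[True]; one final ','.join over the rendered (start, end) pairs.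
def pvRenderB (p : Int × Int) : List Char :=
  if p.1 = p.2 then PySem.Int.toChars p.1
  else PySem.Int.toChars p.1 ++ '-' :: PySem.Int.toChars p.2

def collapse_intervals_alt (items : List Int) : String :=
  match items with
  | [] => ""
  | x :: tl =>
      let its := x :: tl
      let marks := true :: (its.zip (PySem.List.slice its (some 1) none)).map
        (fun p => decide (p.1 + 1 ≠ p.2))
      let starts := ((its.zip marks).filter (fun p => p.2)).map (fun p => p.1)
      let ends := ((its.zip (PySem.List.slice marks (some 1) none ++ [true])).filter (fun p => p.2)).map (fun p => p.1)
      String.ofList (PySem.Chars.join [','] ((starts.zip ends).map pvRenderB))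

-- ===== PRECONDITION & SPEC =====
def Spec_collapse_intervals (items : List Int) (out : String) : Prop := out = collapse_intervals_alt items
instance (items : List Int) (out : String) : Decidable (Spec_collapse_intervals items out) := by unfold Spec_collapse_intervals; infer_instance

-- ===== CLAIM (what is proved, stated in full; the proofs are below) =====
def Claim_equal_collapse_intervals : Prop := ∀ (items : List Int), Dom_collapse_intervals items → Spec_collapse_intervals items (collapse_intervals items)

-- ===== LEMMAS AND PROOFS =====

-- the sequence of rendered maximal runs, starting from a run begun at minN whose last element so far is cur
def pvPieces (cur : Int) (rest : List Int) (minN : Int) : List (List Char) :=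
  match rest with
  | [] => [pvRenderB (minN, cur)]
  | next :: rest' =>
      if cur + 1 ≠ next then pvRenderB (minN, cur) :: pvPieces next rest' next
      else pvPieces next rest' minN

-- run-start values after the head (predecessor chain begins at cur)
def pvSTail (cur : Int) (l : List Int) : List Int :=
  match l with
  | [] => []
  | y :: l' => (if cur + 1 ≠ y then [y] else []) ++ pvSTail y l'

-- run-end values (cur is the pending element)
def pvEVals (cur : Int) (l : List Int) : List Int :=
  match l with
  | [] => [cur]
  | y :: l' => (if cur + 1 ≠ y then [cur] else []) ++ pvEVals y l'

theorem pvPieces_ne_nil (cur : Int) (rest : List Int) (minN : Int) : pvPieces cur rest minN ≠ [] := by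
  induction rest generalizing cur minN with
  | nil => simp [pvPieces]
  | cons next rest' ih =>
      simp only [pvPieces]
      split
      · simp
      · exact ih next minN

theorem pvALoop_eq_pieces (rest : List Int) : ∀ (cur minN maxN : Int) (acc : List Char),
    pvALoop cur rest minN maxN acc = acc ++ (pvPieces cur rest minN).flatMap (fun p => ',' :: p) := by
  induction rest with
  | nil =>
      intro cur minN maxN acc
      simp only [pvALoop, pvPieces, pvRenderB, PySem.Chars.join_cons_cons, PySem.Chars.join_singleton]
      split <;> simp_all
  | cons next rest' ih =>
      intro cur minN maxN acc
      simp only [pvALoop, pvPieces]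
      split
      · rw [ih]
        simp only [pvRenderB, PySem.Chars.join_cons_cons, PySem.Chars.join_singleton, List.flatMap_cons]
        split <;> simp_all
      · exact ih next minN cur acc

theorem pvSTail_eq (l : List Int) : ∀ (cur : Int),
    ((l.zip (((cur :: l).zip l).map (fun p => decide (p.1 + 1 ≠ p.2)))).filter (fun p => p.2)).map (fun p => p.1)
      = pvSTail cur l := by
  induction l with
  | nil => intro cur; rfl
  | cons y l' ih =>
      intro cur
      simp only [List.zip_cons_cons, List.map_cons, List.filter_cons, pvSTail]
      by_cases h : cur + 1 ≠ y
      · rw [if_pos (by simp [h]), if_pos h]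
        simpa using ih y
      · rw [if_neg (by simp [h]), if_neg h]
        simpa using ih y

theorem pvEVals_eq (l : List Int) : ∀ (cur : Int),
    (((cur :: l).zip ((((cur :: l).zip l).map (fun p => decide (p.1 + 1 ≠ p.2))) ++ [true])).filter (fun p => p.2)).map (fun p => p.1)
      = pvEVals cur l := by
  induction l with
  | nil => intro cur; rfl
  | cons y l' ih =>
      intro cur
      simp only [List.zip_cons_cons, List.map_cons, List.cons_append, List.filter_cons, pvEVals]
      by_cases h : cur + 1 ≠ y
      · rw [if_pos (by simp [h]), if_pos h]
        simpa using ih y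
      · rw [if_neg (by simp [h]), if_neg h]
        simpa using ih y

theorem pvZip_render_eq_pieces (l : List Int) : ∀ (cur minN : Int),
    ((minN :: pvSTail cur l).zip (pvEVals cur l)).map pvRenderB = pvPieces cur l minN := by
  induction l with
  | nil => intro cur minN; rfl
  | cons y l' ih =>
      intro cur minN
      simp only [pvSTail, pvEVals, pvPieces]
      by_cases h : cur + 1 ≠ y
      · rw [if_pos h, if_pos h, if_pos h]
        simpa using ih y y
      · rw [if_neg h, if_neg h, if_neg h]
        simpa using ih y minN

theorem pvJoin_comma (ps : List (List Char)) (h : ps ≠ []) :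
    PySem.Chars.join [','] ps = (ps.flatMap (fun p => ',' :: p)).drop 1 := by
  cases ps with
  | nil => exact absurd rfl h
  | cons p ps' =>
      induction ps' generalizing p with
      | nil => simp [PySem.Chars.join_singleton]
      | cons q ps'' ih =>
          rw [PySem.Chars.join_cons_cons]
          simp only [List.flatMap_cons, List.cons_append, List.drop_succ_cons, List.drop_zero] at ih ⊢
          rw [ih q (by simp)]
          simp

theorem pvAlt_eq_join_pieces (x : Int) (tl : List Int) :
    collapse_intervals_alt (x :: tl) = String.ofList (PySem.Chars.join [','] (pvPieces x tl x)) := by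
  show String.ofList _ = _
  rw [PySem.List.slice_from_one, PySem.List.slice_from_one]
  simp only [List.tail_cons, List.zip_cons_cons]
  rw [List.filter_cons_of_pos (by rfl)]
  simp only [List.map_cons]
  rw [pvSTail_eq tl x, pvEVals_eq tl x, pvZip_render_eq_pieces tl x x]

-- ===== VERDICT (by name: the statement is the Claim_ definition above) =====
theorem collapse_intervals_spec : Claim_equal_collapse_intervals := by
  intro items _
  unfold Spec_collapse_intervals
  match items with
  | [] => rfl
  | [x] =>
      rw [pvAlt_eq_join_pieces]
      simp [collapse_intervals, pvPieces, pvRenderB, PySem.Chars.join_singleton]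
  | x :: y :: rest =>
      rw [pvAlt_eq_join_pieces]
      show String.ofList (PySem.List.slice (pvALoop x (y :: rest) x (-1) []) (some 1) none) = _
      rw [pvALoop_eq_pieces (y :: rest) x x (-1) [],
          pvJoin_comma _ (pvPieces_ne_nil x (y :: rest) x)]
      rw [PySem.List.slice_from_one]
      simp [List.drop_one]
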